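-- pv_equiv track=rewrite | github.com/0ldcamel/dsa | w2/listrounds.py | find_rounds
-- ===== SOURCE A (Python) =====
-- def find_rounds(numbers):
--     num_dict = {}
--     n = len(numbers)
--     output = []
--     for i in range(n):
--         num_dict[numbers[i]] = i
--     j = 1
--
--     round = []
--     if n == 1:
--         return [[n]]
--     while j < n:
--         round = [j]
--         while num_dict[j] < num_dict[j + 1]:
--             round += [j + 1]
--             j += 1
--             if j == n:
--                 # round += [n]
--                 output.append(round)
--                 break
--         else:
--             output.append(round)
--             round = []
--             j += 1
--             if j == n:
--                 output.append([n])
--     return output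
-- ===== SOURCE B (Python) =====
-- def find_rounds(numbers):
--     n = len(numbers)
--     pos = {}
--     for i, v in enumerate(numbers):
--         pos[v] = i
--     if n == 0:
--         return []
--     if n == 1:
--         return [[1]]
--     output = []
--     start = 1
--     for j in range(1, n):
--         if pos[j] >= pos[j + 1]:
--             output.append(list(range(start, j + 1)))
--             start = j + 1
--     output.append(list(range(start, n + 1)))
--     return output
-- ===== Notes on version B (the rewrite author's own statement) =====
-- stated objective: alternative
-- what changed: Replaces A's nested while loops (growing each round element by element with a break/else dance) by a single flat pass over range(1,n) that records breakpoints where pos[j] >= pos[j+1] and emits each group as one range(start, j+1), with the final segment appended once after the loop.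
import Mathlib
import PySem

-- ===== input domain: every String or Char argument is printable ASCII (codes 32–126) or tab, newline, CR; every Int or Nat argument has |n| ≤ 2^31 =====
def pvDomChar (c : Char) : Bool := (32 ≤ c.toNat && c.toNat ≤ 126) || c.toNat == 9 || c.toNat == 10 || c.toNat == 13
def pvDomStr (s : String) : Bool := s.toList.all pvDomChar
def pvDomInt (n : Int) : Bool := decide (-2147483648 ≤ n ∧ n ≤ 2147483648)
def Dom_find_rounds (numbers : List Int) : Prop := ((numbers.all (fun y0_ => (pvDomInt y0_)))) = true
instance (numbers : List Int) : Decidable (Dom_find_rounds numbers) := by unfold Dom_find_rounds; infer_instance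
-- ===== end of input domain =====

-- B replaces A's nested while loops by one flat pass over range(1,n) that cuts 1..n at the
-- breakpoints where pos[j] >= pos[j+1] and emits each group as a single range; same values.

-- ===== PORT A =====
-- `for i in range(n): num_dict[numbers[i]] = i`, realized as the same (key, value) insertion
-- sequence via enumerate (both ports build this dict).
def findRoundsDict (numbers : List Int) : PySem.Dict Int Int :=
  (PySem.List.enumerate numbers 0).foldl (fun d p => d.insert p.2 p.1) PySem.Dict.empty

mutual
-- inner `while num_dict[j] < num_dict[j+1]`; a missing key (Python KeyError, outside Pre_)
-- gives none.  After the `break` at j == n the outer `while j < n` ends at once, so the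
-- break case returns the final output directly.
def findRoundsInner (d : PySem.Dict Int Int) (n : Int) (round : List Int) (j : Int)
    (output : List (List Int)) : Nat → Option (List (List Int))
  | 0 => none
  | fuel+1 =>
    match d.get? j, d.get? (j + 1) with
    | some dj, some dj1 =>
      if dj < dj1 then
        let round' := round ++ [j + 1]
        if j + 1 = n then some (output ++ [round'])                    -- break at j == n
        else findRoundsInner d n round' (j + 1) output fuel
      else
        -- while-else: append the round, advance j, maybe append [n], back to the outer loop
        let output' := output ++ [round]
        if j + 1 = n then some (output' ++ [[n]])
        else findRoundsOuter d n (j + 1) output' fuel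
    | _, _ => none

-- outer `while j < n`
def findRoundsOuter (d : PySem.Dict Int Int) (n j : Int)
    (output : List (List Int)) : Nat → Option (List (List Int))
  | 0 => none
  | fuel+1 =>
    if j < n then findRoundsInner d n [j] j output fuel else some output
end

def find_rounds (numbers : List Int) : List (List Int) :=
  let d := findRoundsDict numbers
  let n : Int := numbers.length
  if n = 1 then [[n]]
  else
    -- fuel 2*n+2 overshoots the ≤ 2 fuel steps the loops take per value of j
    match findRoundsOuter d n 1 [] (2 * numbers.length + 2) with
    | some output => output
    | none => []          -- KeyError: unreachable under Pre_find_rounds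

-- ===== PORT B =====
-- loop body of `for j in range(1, n)`: breakpoint where pos[j] >= pos[j+1]; KeyError → none
def bStep (pos : PySem.Dict Int Int) (st : Option (List (List Int) × Int)) (j : Int) :
    Option (List (List Int) × Int) :=
  st.bind fun p =>
    match pos.get? j, pos.get? (j + 1) with
    | some a, some b =>
        some (if b ≤ a then (p.1 ++ [PySem.List.pyRange p.2 (j + 1) 1], j + 1) else p)
    | _, _ => none

-- the pass over range(j, n) from state (out, start), plus the final segment append
def bTail (pos : PySem.Dict Int Int) (n j s : Int) (out : List (List Int)) :
    List (List Int) :=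
  match (PySem.List.pyRange j n 1).foldl (bStep pos) (some (out, s)) with
  | some p => p.1 ++ [PySem.List.pyRange p.2 (n + 1) 1]
  | none => []          -- KeyError: unreachable under Pre_find_rounds

def find_rounds_alt (numbers : List Int) : List (List Int) :=
  let n : Int := numbers.length
  let pos := findRoundsDict numbers
  if n = 0 then []
  else if n = 1 then [[1]]
  else bTail pos n 1 1 []

-- ===== PRECONDITION & SPEC =====
-- Pre_ excludes exactly the inputs on which A raises KeyError: for n ≥ 2 every value 1..n
-- must occur in the list (A looks all of them up).
def Pre_find_rounds (numbers : List Int) : Prop :=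
  2 ≤ (numbers.length : Int) →
    ∀ k ∈ PySem.List.pyRange 1 ((numbers.length : Int) + 1) 1, k ∈ numbers

instance (numbers : List Int) : Decidable (Pre_find_rounds numbers) := by
  unfold Pre_find_rounds; infer_instance

def pvWitness_find_rounds : List Int := [2, 1, 3, 4]

def Spec_find_rounds (numbers : List Int) (out : List (List Int)) : Prop :=
  out = find_rounds_alt numbers
instance (numbers : List Int) (out : List (List Int)) : Decidable (Spec_find_rounds numbers out) := by
  unfold Spec_find_rounds; infer_instance

-- ===== CLAIM (what is proved, stated in full; the proofs are below) =====
def Claim_equal_find_rounds : Prop := ∀ (numbers : List Int), Dom_find_rounds numbers →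
  Pre_find_rounds numbers → Spec_find_rounds numbers (find_rounds numbers)

-- ===== LEMMAS AND PROOFS =====

theorem bTail_stop (pos : PySem.Dict Int Int) (n s : Int) (out : List (List Int)) :
    bTail pos n n s out = out ++ [PySem.List.pyRange s (n + 1) 1] := by
  simp [bTail, PySem.List.pyRange_one_eq_nil (le_refl n)]

theorem bTail_cons (pos : PySem.Dict Int Int) (n j s : Int) (out : List (List Int))
    (a b : Int) (hj : j < n) (ha : pos.get? j = some a) (hb : pos.get? (j + 1) = some b) :
    bTail pos n j s out =
      if b ≤ a then bTail pos n (j + 1) (j + 1) (out ++ [PySem.List.pyRange s (j + 1) 1])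
      else bTail pos n (j + 1) s out := by
  rw [bTail, PySem.List.pyRange_one_cons hj, List.foldl_cons]
  by_cases h : b ≤ a <;> simp [bStep, ha, hb, h, bTail]

theorem inner_eq_bTail (d : PySem.Dict Int Int) (n : Int)
    (hkeys : ∀ k : Int, 1 ≤ k → k ≤ n → ∃ v, d.get? k = some v) :
    ∀ m : Nat, ∀ j s : Int, ∀ out : List (List Int), ∀ fuel : Nat,
      1 ≤ s → s ≤ j → j < n → (n - j).toNat = m + 1 → 2 * m + 2 ≤ fuel →
      findRoundsInner d n (PySem.List.pyRange s (j + 1) 1) j out fuel =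
        some (bTail d n j s out) := by
  intro m
  induction m with
  | zero =>
    intro j s out fuel hs hsj hj hm hfuel
    have hjn : j + 1 = n := by omega
    obtain ⟨f, rfl⟩ : ∃ f, fuel = f + 1 := ⟨fuel - 1, by omega⟩
    obtain ⟨dj, hdj⟩ := hkeys j (by omega) (by omega)
    obtain ⟨dj1, hdj1⟩ := hkeys (j + 1) (by omega) (by omega)
    rw [findRoundsInner, hdj, hdj1]
    rw [bTail_cons d n j s out dj dj1 hj hdj hdj1]
    by_cases h : dj < dj1
    · have hba : ¬ dj1 ≤ dj := by omega
      simp only [h, if_true, hjn, hba, if_false]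
      rw [← hjn, bTail_stop,
        ← PySem.List.pyRange_one_succ_right (a := s) (b := j + 1) (by omega)]
    · have hba : dj1 ≤ dj := by omega
      simp only [h, if_false, hjn, hba, if_true]
      rw [← hjn, bTail_stop]
      simp [PySem.List.pyRange_one_singleton]
  | succ m ih =>
    intro j s out fuel hs hsj hj hm hfuel
    have hjn : j + 1 < n := by omega
    obtain ⟨f, rfl⟩ : ∃ f, fuel = f + 1 := ⟨fuel - 1, by omega⟩
    obtain ⟨dj, hdj⟩ := hkeys j (by omega) (by omega)
    obtain ⟨dj1, hdj1⟩ := hkeys (j + 1) (by omega) (by omega)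
    rw [findRoundsInner, hdj, hdj1]
    rw [bTail_cons d n j s out dj dj1 hj hdj hdj1]
    by_cases h : dj < dj1
    · have hba : ¬ dj1 ≤ dj := by omega
      simp only [h, if_true, hba, if_false]
      rw [if_neg (by omega : ¬ j + 1 = n)]
      rw [← PySem.List.pyRange_one_succ_right (a := s) (b := j + 1) (by omega)]
      exact ih (j + 1) s out f hs (by omega) hjn (by omega) (by omega)
    · have hba : dj1 ≤ dj := by omega
      simp only [h, if_false, hba, if_true]
      rw [if_neg (by omega : ¬ j + 1 = n)]
      obtain ⟨f', rfl⟩ : ∃ f', f = f' + 1 := ⟨f - 1, by omega⟩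
      rw [findRoundsOuter, if_pos hjn]
      have h1 : ([j + 1] : List Int) = PySem.List.pyRange (j + 1) (j + 1 + 1) 1 :=
        (PySem.List.pyRange_one_singleton (j + 1)).symm
      rw [h1]
      exact ih (j + 1) (j + 1) (out ++ [PySem.List.pyRange s (j + 1) 1]) f'
        (by omega) (le_refl _) hjn (by omega) (by omega)

theorem keys_findRoundsDict (numbers : List Int) (k : Int) (hk : k ∈ numbers) :
    ∃ v, (findRoundsDict numbers).get? k = some v := by
  have hkeys : (findRoundsDict numbers).keys = PySem.Set.update (PySem.Dict.empty : PySem.Dict Int Int).keys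
      ((PySem.List.enumerate numbers 0).map (·.2)) := by
    exact PySem.Dict.keys_foldl_insert_key (PySem.List.enumerate numbers 0)
      (·.2) (fun d p => p.1) (PySem.Dict.empty : PySem.Dict Int Int)
  have hmem : k ∈ (findRoundsDict numbers).keys := by
    rw [hkeys, PySem.List.map_snd_enumerate]
    exact (PySem.Set.mem_update _ _ _).mpr (Or.inr hk)
  rcases h : (findRoundsDict numbers).get? k with _ | v
  · exact absurd hmem ((PySem.Dict.get?_eq_none_iff_not_mem_keys _ _).mp h)
  · exact ⟨v, rfl⟩

-- ===== VERDICT (by name: the statement is the Claim_ definition above) =====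
theorem find_rounds_spec : Claim_equal_find_rounds := by
  intro numbers _ hpre
  unfold Spec_find_rounds find_rounds find_rounds_alt
  by_cases h0 : (numbers.length : Int) = 0
  · have : numbers.length = 0 := by omega
    simp [this, findRoundsOuter]
  · by_cases h1 : (numbers.length : Int) = 1
    · simp [h1]
    · have hn2 : 2 ≤ (numbers.length : Int) := by omega
      have hkeys : ∀ k : Int, 1 ≤ k → k ≤ (numbers.length : Int) →
          ∃ v, (findRoundsDict numbers).get? k = some v := by
        intro k hk1 hk2
        exact keys_findRoundsDict numbers k
          (hpre hn2 k ((PySem.List.mem_pyRange_one).mpr ⟨hk1, by omega⟩))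
      simp only [h0, h1, if_false]
      obtain ⟨f, hf⟩ : ∃ f, 2 * numbers.length + 2 = (f + 1) + 1 :=
        ⟨2 * numbers.length, by omega⟩
      rw [hf, findRoundsOuter, if_pos (by omega : (1:Int) < (numbers.length : Int))]
      have h1r : ([1] : List Int) = PySem.List.pyRange 1 (1 + 1) 1 :=
        (PySem.List.pyRange_one_singleton 1).symm
      rw [h1r, inner_eq_bTail (findRoundsDict numbers) (numbers.length : Int) hkeys
        ((numbers.length : Int) - 2).toNat 1 1 [] (f + 1)
        (le_refl 1) (le_refl 1) (by omega) (by omega) (by omega)]
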